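-- pv_equiv track=rewrite | github.com/bill-prog/RockPaperScissorsAI | RPS.py | countNextMoves
-- ===== SOURCE A (Python) =====
-- def countNextMoves(opponent_history):
--   first = opponent_history[-3]
--   second = opponent_history[-2]
--   third = opponent_history[-1]
--
--   string = first+second+third
--
--   allMoves = ""
--   for x in opponent_history:
--     allMoves += x
--
-- # we use KMP for pattern recognition
-- # we will find all recurrances of last THREE played
-- # symbols and try to predict the next one
--   listOfIndexes= KMPSearch(string, allMoves)
--
--   listOfNextMoves = []
--   for index in listOfIndexes:
--     if (index+len(string)) <= len(allMoves)-1: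
--       next = allMoves[index+len(string)]
--       listOfNextMoves.append(next)
--
--   return [listOfNextMoves,string]
--
-- def KMPSearch(pat, txt):
-- 	M = len(pat)
-- 	listOfIndexes = []
-- 	N = len(txt)
--
--
-- 	lps = [0]*M
-- 	j = 0
--
--
-- 	computeLPSArray(pat, M, lps)
--
-- 	i = 0
-- 	while i < N:
-- 		if pat[j] == txt[i]:
-- 			i += 1
-- 			j += 1
--
-- 		if j == M:
-- 			listOfIndexes.append(i-j)
-- 			j = lps[j-1]
--
--
-- 		elif i < N and pat[j] != txt[i]:
--
-- 			if j != 0: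
-- 				j = lps[j-1]
-- 			else:
-- 				i += 1
-- 	return listOfIndexes
--
-- def computeLPSArray(pat, M, lps):
-- 	len = 0
--
-- 	lps[0]
-- 	i = 1
--
--
-- 	while i < M:
-- 		if pat[i]== pat[len]:
-- 			len += 1
-- 			lps[i] = len
-- 			i += 1
-- 		else:
--
-- 			if len != 0:
-- 				len = lps[len-1]
--
--
-- 			else:
-- 				lps[i] = 0
-- 				i += 1
-- ===== SOURCE B (Python) =====
-- def countNextMoves(opponent_history):
--   first = opponent_history[-3]
--   second = opponent_history[-2]
--   third = opponent_history[-1]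
--
--   string = first + second + third
--
--   allMoves = "".join(opponent_history)
--
--   # plain sliding-window scan instead of KMP: i is a match start iff the
--   # slice of len(string) chars starting at i equals string
--   listOfNextMoves = []
--   n = len(allMoves)
--   m = len(string)
--   for i in range(n):
--     if allMoves[i:i+m] == string and i + m <= n - 1:
--       listOfNextMoves.append(allMoves[i + m])
--
--   return [listOfNextMoves, string]
-- ===== Notes on version B (the rewrite author's own statement) =====
-- stated objective: simpler
-- what changed: Replaced the hand-written KMP failure-function search by a plain sliding-window scan (one slice comparison per position) that collects the following symbol directly during the scan; history is concatenated with ''.join instead of a += loop.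
import Mathlib
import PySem

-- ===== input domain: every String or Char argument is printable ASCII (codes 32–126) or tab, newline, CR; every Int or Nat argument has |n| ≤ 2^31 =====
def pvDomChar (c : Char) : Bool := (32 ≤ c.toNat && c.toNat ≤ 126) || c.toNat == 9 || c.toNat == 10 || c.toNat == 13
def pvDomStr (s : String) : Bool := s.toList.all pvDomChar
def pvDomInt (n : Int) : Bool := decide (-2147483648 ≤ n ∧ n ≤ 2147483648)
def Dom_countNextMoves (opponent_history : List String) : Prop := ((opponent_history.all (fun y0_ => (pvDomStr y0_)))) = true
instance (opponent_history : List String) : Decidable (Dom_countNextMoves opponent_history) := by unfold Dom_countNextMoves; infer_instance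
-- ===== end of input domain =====

-- B replaces A's hand-written KMP search by a plain sliding-window scan (simpler, no failure table);
-- where A raises IndexError (fewer than 3 moves, or an empty last-three pattern) Pre_ excludes the input.


-- ===== PORT A =====

-- the `while i < M` loop of computeLPSArray (fuel only makes the recursion total; it never runs out
-- on the fuel computeLPSArrayA supplies)
def lpsLoopA (pat : List Char) (M : Nat) : Nat → Nat → Nat → List Nat → List Nat
  | 0, _, _, lps => lps
  | fuel+1, len, i, lps =>
    if i < M then
      if pat.getD i ' ' == pat.getD len ' ' then
        lpsLoopA pat M fuel (len+1) (i+1) (lps.set i (len+1))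
      else if len != 0 then
        lpsLoopA pat M fuel (lps.getD (len-1) 0) i lps
      else
        lpsLoopA pat M fuel len (i+1) (lps.set i 0)
    else lps

-- computeLPSArray(pat, M, lps); the bare statement `lps[0]` in the Python only has an effect when
-- M = 0 (it raises IndexError there — excluded by Pre_), otherwise it is a no-op read
def computeLPSArrayA (pat : List Char) (M : Nat) (lps : List Nat) : List Nat :=
  lpsLoopA pat M (2*M+1) 0 1 lps

-- the `while i < N` loop of KMPSearch (same fuel remark)
def kmpLoopA (pat txt : List Char) (M N : Nat) (lps : List Nat) :
    Nat → Nat → Nat → List Nat → List Nat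
  | 0, _, _, acc => acc
  | fuel+1, i, j, acc =>
    if i < N then
      let p := if pat.getD j ' ' == txt.getD i ' ' then (i+1, j+1) else (i, j)
      if p.2 == M then
        kmpLoopA pat txt M N lps fuel p.1 (lps.getD (p.2-1) 0) (acc ++ [p.1 - p.2])
      else if p.1 < N && !(pat.getD p.2 ' ' == txt.getD p.1 ' ') then
        if p.2 != 0 then
          kmpLoopA pat txt M N lps fuel p.1 (lps.getD (p.2-1) 0) acc
        else
          kmpLoopA pat txt M N lps fuel (p.1+1) p.2 acc
      else kmpLoopA pat txt M N lps fuel p.1 p.2 acc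
    else acc

def KMPSearchA (pat txt : List Char) : List Nat :=
  let M := pat.length
  let N := txt.length
  let lps := List.replicate M 0
  let lps := computeLPSArrayA pat M lps
  kmpLoopA pat txt M N lps (2*N+1) 0 0 []

def countNextMoves (opponent_history : List String) : List String × String :=
  match PySem.List.pyGet? opponent_history (-3), PySem.List.pyGet? opponent_history (-2),
        PySem.List.pyGet? opponent_history (-1) with
  | some first, some second, some third =>
    let string : List Char := first.toList ++ second.toList ++ third.toList
    let allMoves : List Char := opponent_history.foldl (fun acc x => acc ++ x.toList) []
    let listOfIndexes := KMPSearchA string allMoves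
    let listOfNextMoves := listOfIndexes.foldl (fun acc (index : Nat) =>
      if ((index : Nat) : Int) + (string.length : Int) ≤ (allMoves.length : Int) - 1 then
        acc ++ [String.ofList [PySem.List.pyGetD allMoves
          (((index : Nat) : Int) + (string.length : Int)) ' ']]
      else acc) []
    (listOfNextMoves, String.ofList string)
  | _, _, _ => ([], "")   -- unreachable under Pre_ (Python raises IndexError)

-- ===== PORT B =====
def countNextMoves_alt (opponent_history : List String) : List String × String :=
  match PySem.List.pyGet? opponent_history (-3) with
  | none => ([], "")   -- unreachable under Pre_ (Python raises IndexError)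
  | some first =>
  match PySem.List.pyGet? opponent_history (-2) with
  | none => ([], "")
  | some second =>
  match PySem.List.pyGet? opponent_history (-1) with
  | none => ([], "")
  | some third =>
    let string : List Char := first.toList ++ second.toList ++ third.toList
    let allMoves : List Char := PySem.Chars.join [] (opponent_history.map String.toList)
    let n : Nat := allMoves.length
    let m : Nat := string.length
    let listOfNextMoves := (PySem.List.pyRange 0 (n : Int) 1).foldl (fun acc i =>
      if PySem.List.slice allMoves (some i) (some (i + (m : Int))) = string ∧
          i + (m : Int) ≤ (n : Int) - 1 then
        acc ++ [String.ofList [PySem.List.pyGetD allMoves (i + (m : Int)) ' ']]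
      else acc) []
    (listOfNextMoves, String.ofList string)

-- ===== PRECONDITION & SPEC =====
-- Pre_ excludes exactly the inputs where the Python A raises IndexError: fewer than 3 moves
-- (opponent_history[-3]), or a last-three pattern that is empty (`lps[0]` on an empty lps).
def Pre_countNextMoves (opponent_history : List String) : Prop :=
  3 ≤ opponent_history.length ∧
  ((opponent_history.drop (opponent_history.length - 3)).map String.toList).flatten ≠ []
instance (opponent_history : List String) : Decidable (Pre_countNextMoves opponent_history) := by
  unfold Pre_countNextMoves; infer_instance

def pvWitness_countNextMoves : List String := ["R", "P", "S", "R"]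

def Spec_countNextMoves (opponent_history : List String) (out : List String × String) : Prop :=
  out = countNextMoves_alt opponent_history
instance (opponent_history : List String) (out : List String × String) :
    Decidable (Spec_countNextMoves opponent_history out) := by
  unfold Spec_countNextMoves; infer_instance

-- ===== CLAIM (what is proved, stated in full; the proofs are below) =====
def Claim_equal_countNextMoves : Prop := ∀ (opponent_history : List String),
  Dom_countNextMoves opponent_history → Pre_countNextMoves opponent_history →
  Spec_countNextMoves opponent_history (countNextMoves opponent_history)


-- ===== LEMMAS AND PROOFS =====

-- suffix of a concatenation with a last element
theorem concat_suffix_concat (a b : List Char) (x y : Char) :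
    ((a ++ [x]) <:+ (b ++ [y])) ↔ (a <:+ b ∧ x = y) := by
  constructor
  · intro h
    rw [← List.reverse_prefix] at h
    simp only [List.reverse_append, List.reverse_cons, List.reverse_nil, List.nil_append,
      List.singleton_append, List.cons_prefix_cons] at h
    exact ⟨List.reverse_prefix.mp h.2, h.1⟩
  · rintro ⟨h, rfl⟩
    rw [← List.reverse_prefix]
    simp only [List.reverse_append, List.reverse_cons, List.reverse_nil, List.nil_append,
      List.singleton_append, List.cons_prefix_cons]
    exact ⟨trivial, List.reverse_prefix.mpr h⟩

-- theching workhorse: extending a matched prefix/suffix by one character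
theorem take_succ_suffix (u v : List Char) (k i : Nat) (hk : k < u.length) (hi : i < v.length) :
    (u.take (k+1) <:+ v.take (i+1)) ↔ (u.take k <:+ v.take i ∧ u[k]? = v[i]?) := by
  rw [List.take_add_one, List.take_add_one, u.getElem?_eq_getElem hk, v.getElem?_eq_getElem hi]
  simp only [Option.toList_some]
  rw [concat_suffix_concat]
  simp

-- length of the longest proper border of pat.take i (= the value lps[i-1] must take)
def Brd (pat : List Char) (i : Nat) : Nat :=
  Nat.findGreatest (fun k => pat.take k <:+ pat.take i) (i-1)

theorem Brd_le (pat : List Char) (i : Nat) : Brd pat i ≤ i - 1 := by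
  unfold Brd; exact Nat.findGreatest_le _

theorem Brd_suffix (pat : List Char) (i : Nat) : pat.take (Brd pat i) <:+ pat.take i := by
  unfold Brd
  exact Nat.findGreatest_spec (P := fun k => pat.take k <:+ pat.take i) (m := 0)
    (Nat.zero_le _) (by simp)

theorem le_Brd (pat : List Char) (i k : Nat) (hk : k < i) (h : pat.take k <:+ pat.take i) :
    k ≤ Brd pat i := by
  unfold Brd; exact Nat.le_findGreatest (by omega) h

-- shorter borders of a string live inside a longer border
theorem border_of_border (pat : List Char) (i k b : Nat) (hkb : k ≤ b) (hb : b ≤ pat.length)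
    (h1 : pat.take k <:+ pat.take i) (h2 : pat.take b <:+ pat.take i) :
    pat.take k <:+ pat.take b := by
  apply List.suffix_of_suffix_length_le h1 h2
  simp; omega

theorem Brd_succ_of_match (pat : List Char) (len i : Nat) (hi : i < pat.length) (hlen : len < i)
    (hs : pat.take len <:+ pat.take i)
    (hmax : ∀ k, len < k → k < i → pat.take k <:+ pat.take i → pat[k]? ≠ pat[i]?)
    (hc : pat[len]? = pat[i]?) :
    Brd pat (i+1) = len + 1 := by
  have h1 : pat.take (len+1) <:+ pat.take (i+1) :=
    (take_succ_suffix pat pat len i (by omega) hi).mpr ⟨hs, hc⟩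
  have hub : ∀ k, pat.take k <:+ pat.take (i+1) → k ≤ i → k ≤ len + 1 := by
    intro k hk hki
    by_contra hgt
    push_neg at hgt
    obtain ⟨k', rfl⟩ : ∃ k', k = k'+1 := ⟨k-1, by omega⟩
    have hd := (take_succ_suffix pat pat k' i (by omega) hi).mp hk
    exact hmax k' (by omega) (by omega) hd.1 hd.2
  apply Nat.le_antisymm
  · exact hub _ (Brd_suffix pat (i+1)) (by have := Brd_le pat (i+1); omega)
  · exact le_Brd pat (i+1) (len+1) (by omega) h1

theorem Brd_succ_of_mismatch0 (pat : List Char) (i : Nat) (hi : i < pat.length)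
    (hmax : ∀ k, 0 < k → k < i → pat.take k <:+ pat.take i → pat[k]? ≠ pat[i]?)
    (hc : pat[0]? ≠ pat[i]?) : Brd pat (i+1) = 0 := by
  have hub : ∀ k, pat.take k <:+ pat.take (i+1) → k ≤ i → k = 0 := by
    intro k hk hki
    by_contra hgt
    obtain ⟨k', rfl⟩ : ∃ k', k = k'+1 := ⟨k-1, by omega⟩
    have hd := (take_succ_suffix pat pat k' i (by omega) hi).mp hk
    rcases Nat.eq_zero_or_pos k' with h0 | h0
    · subst h0; exact hc hd.2
    · exact hmax k' h0 (by omega) hd.1 hd.2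
  exact hub _ (Brd_suffix pat (i+1)) (by have := Brd_le pat (i+1); omega)

-- ===== correctness of the lps (failure-table) loop =====

def LpsInv (pat : List Char) (len i : Nat) (lps : List Nat) : Prop :=
  1 ≤ i ∧ i ≤ pat.length ∧ lps.length = pat.length ∧
  (∀ q, q < i → lps.getD q 0 = Brd pat (q+1)) ∧
  len < i ∧ pat.take len <:+ pat.take i ∧
  (∀ k, len < k → k < i → pat.take k <:+ pat.take i → pat[k]? ≠ pat[i]?)

theorem lpsLoop_correct (pat : List Char) :
    ∀ fuel len i lps, LpsInv pat len i lps → 2*(pat.length - i) + len < fuel →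
      (∀ q, q < pat.length → (lpsLoopA pat pat.length fuel len i lps).getD q 0 = Brd pat (q+1)) := by
  intro fuel
  induction fuel with
  | zero => intro len i lps _ hf; omega
  | succ fuel ih =>
    intro len i lps hinv hfuel
    obtain ⟨h1, h2, hlen, hq, hlt, hsuf, hmax⟩ := hinv
    unfold lpsLoopA
    by_cases hiM : i < pat.length
    · simp only [hiM, if_pos]
      have egi : pat.getD i ' ' = pat[i] := List.getD_eq_getElem pat ' ' hiM
      have egl : pat.getD len ' ' = pat[len] := List.getD_eq_getElem pat ' ' (by omega)
      have egqi : pat[i]? = some pat[i] := List.getElem?_eq_getElem hiM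
      have egql : pat[len]? = some pat[len] := List.getElem?_eq_getElem (by omega)
      by_cases hcmp : pat[len]? = pat[i]?
      · have hbeq : (pat.getD i ' ' == pat.getD len ' ') = true := by
          rw [egi, egl, beq_iff_eq]
          rw [egqi, egql] at hcmp; exact (Option.some_inj.mp hcmp).symm
        rw [hbeq]
        simp only [if_pos]
        apply ih (len+1) (i+1) (lps.set i (len+1)) ?_ (by omega)
        refine ⟨by omega, by omega, by simpa using hlen, ?_, by omega, ?_, ?_⟩
        · intro q hq'
          rcases Nat.lt_or_ge q i with hqi | hqi
          · have : (lps.set i (len+1)).getD q 0 = lps.getD q 0 := by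
              unfold List.getD
              rw [List.getElem?_set_ne (by omega)]
            rw [this]; exact hq q hqi
          · have hqi : q = i := by omega
            rw [hqi]
            have : (lps.set i (len+1)).getD i 0 = len+1 := by
              unfold List.getD
              rw [List.getElem?_set_self (by omega)]
              rfl
            rw [this]
            exact (Brd_succ_of_match pat len i hiM hlt hsuf hmax hcmp).symm
        · exact (take_succ_suffix pat pat len i (by omega) hiM).mpr ⟨hsuf, hcmp⟩
        · intro k hk1 hk2 hks
          exfalso
          obtain ⟨k', rfl⟩ : ∃ k', k = k'+1 := ⟨k-1, by omega⟩
          have hd := (take_succ_suffix pat pat k' i (by omega) hiM).mp hks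
          exact hmax k' (by omega) (by omega) hd.1 hd.2
      · have hbeq : (pat.getD i ' ' == pat.getD len ' ') = false := by
          rw [egi, egl, beq_eq_false_iff_ne, ne_eq]
          intro h
          apply hcmp
          rw [egqi, egql, h]
        rw [hbeq]
        simp only [Bool.false_eq_true, if_neg, Bool.not_eq_true]
        by_cases hl0 : len = 0
        · subst hl0
          simp only [if_neg, bne_self_eq_false]
          apply ih 0 (i+1) (lps.set i 0) ?_ (by omega)
          refine ⟨by omega, by omega, by simpa using hlen, ?_, by omega, by simp, ?_⟩
          · intro q hq'
            rcases Nat.lt_or_ge q i with hqi | hqi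
            · have : (lps.set i 0).getD q 0 = lps.getD q 0 := by
                unfold List.getD
                rw [List.getElem?_set_ne (by omega)]
              rw [this]; exact hq q hqi
            · have hqi : q = i := by omega
              rw [hqi]
              have : (lps.set i 0).getD i 0 = 0 := by
                unfold List.getD
                rw [List.getElem?_set_self (by omega)]
                rfl
              rw [this]
              exact (Brd_succ_of_mismatch0 pat i hiM hmax hcmp).symm
          · intro k hk1 hk2 hks
            exfalso
            obtain ⟨k', rfl⟩ : ∃ k', k = k'+1 := ⟨k-1, by omega⟩
            have hd := (take_succ_suffix pat pat k' i (by omega) hiM).mp hks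
            rcases Nat.eq_zero_or_pos k' with h0 | h0
            · subst h0; exact hcmp hd.2
            · exact hmax k' h0 (by omega) hd.1 hd.2
        · have hbne : (len != 0) = true := by simpa using hl0
          rw [hbne]
          simp only [if_pos]
          have hlb : lps.getD (len-1) 0 = Brd pat len := by
            have := hq (len-1) (by omega)
            rwa [Nat.sub_add_cancel (by omega)] at this
          rw [hlb]
          have hble : Brd pat len ≤ len - 1 := Brd_le pat len
          apply ih (Brd pat len) i lps ?_ (by omega)
          refine ⟨h1, h2, hlen, hq, by omega, ?_, ?_⟩
          · exact (Brd_suffix pat len).trans hsuf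
          · intro k hk1 hk2 hks
            rcases Nat.lt_trichotomy k len with hkl | hkl | hkl
            · exfalso
              have : pat.take k <:+ pat.take len :=
                border_of_border pat i k len (by omega) (by omega) hks hsuf
              have := le_Brd pat len k hkl this
              omega
            · subst hkl
              intro h; exact hcmp h
            · exact hmax k hkl hk2 hks
    · simp only [hiM, if_neg]
      intro q hq'
      have : i = pat.length := by omega
      exact hq q (by omega)

def occIn (pat txt : List Char) (M i : Nat) : List Nat :=
  (List.range (i+1-M)).filter (fun p => decide ((txt.drop p).take M = pat))

theorem suffix_take_iff (pat txt : List Char) (M i : Nat) (hM : pat.length = M)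
    (hMi : M ≤ i) (hiN : i ≤ txt.length) :
    (pat <:+ txt.take i) ↔ (txt.drop (i-M)).take M = pat := by
  have hsplit : txt.take i = txt.take (i-M) ++ (txt.drop (i-M)).take M := by
    rw [← List.take_add]; congr 1; omega
  constructor
  · intro h
    have h2 : (txt.drop (i-M)).take M <:+ txt.take i := hsplit ▸ List.suffix_append _ _
    have hlen : ((txt.drop (i-M)).take M).length = M := by
      simp [List.length_take, List.length_drop]; omega
    exact ((List.suffix_of_suffix_length_le h h2 (by omega)).eq_of_length (by omega)).symm
  · intro h
    rw [hsplit, ← h]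
    exact List.suffix_append _ _

theorem occIn_succ_ge (pat txt : List Char) (M i : Nat) (h : M ≤ i+1) :
    occIn pat txt M (i+1) = occIn pat txt M i ++
      (if (txt.drop (i+1-M)).take M = pat then [i+1-M] else []) := by
  unfold occIn
  have e : i+1+1-M = (i+1-M)+1 := by omega
  rw [e, List.range_succ, List.filter_append]
  congr 1
  by_cases hp : (txt.drop (i+1-M)).take M = pat <;> simp [hp, List.filter]

theorem occIn_succ_lt (pat txt : List Char) (M i : Nat) (h : i+1 < M) :
    occIn pat txt M (i+1) = occIn pat txt M i := by
  unfold occIn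
  congr 2
  omega

def KmpInv (pat txt : List Char) (i j : Nat) (acc : List Nat) : Prop :=
  j < pat.length ∧ j ≤ i ∧ i ≤ txt.length ∧
  pat.take j <:+ txt.take i ∧
  (∀ k, j < k → k < pat.length → pat.take k <:+ txt.take i → pat[k]? ≠ txt[i]?) ∧
  acc = occIn pat txt pat.length i

theorem kmp_shift (pat txt : List Char) (i j : Nat) (acc : List Nat)
    (hInv : KmpInv pat txt i j acc) (hj : 1 ≤ j) (hc : pat[j]? ≠ txt[i]?) :
    KmpInv pat txt i (Brd pat j) acc := by
  obtain ⟨hjM, hji, hiN, hsuf, hmax, hacc⟩ := hInv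
  have hble : Brd pat j ≤ j - 1 := Brd_le pat j
  refine ⟨by omega, by omega, hiN, ?_, ?_, hacc⟩
  · exact (Brd_suffix pat j).trans hsuf
  · intro k hk1 hk2 hks
    rcases Nat.lt_trichotomy k j with hkl | hkl | hkl
    · exfalso
      have h1 : pat.take k <:+ pat.take j :=
        List.suffix_of_suffix_length_le hks hsuf (by simp; omega)
      have := le_Brd pat j k hkl h1
      omega
    · subst hkl; exact hc
    · exact hmax k hkl hk2 hks

theorem kmp_advance (pat txt : List Char) (i : Nat) (acc : List Nat)
    (hInv : KmpInv pat txt i 0 acc) (hiN : i < txt.length) (hc : pat[0]? ≠ txt[i]?) :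
    KmpInv pat txt (i+1) 0 acc := by
  obtain ⟨hjM, hji, _, hsuf, hmax, hacc⟩ := hInv
  have hnocc : ∀ k, 0 < k → k ≤ pat.length → ¬ pat.take k <:+ txt.take (i+1) := by
    intro k hk0 hkM hks
    obtain ⟨k', rfl⟩ : ∃ k', k = k'+1 := ⟨k-1, by omega⟩
    have hd := (take_succ_suffix pat txt k' i (by omega) hiN).mp hks
    rcases Nat.eq_zero_or_pos k' with h0 | h0
    · subst h0; exact hc hd.2
    · rcases Nat.lt_or_ge k' pat.length with hklt | hklt
      · exact hmax k' h0 hklt hd.1 hd.2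
      · -- k' = pat.length, k = pat.length + 1 > pat.length: impossible since k ≤ pat.length
        omega
  refine ⟨hjM, by omega, by omega, by simp, ?_, ?_⟩
  · intro k hk1 hk2 hks
    exact absurd hks (hnocc k hk1 (by omega))
  · rw [hacc]
    rcases Nat.lt_or_ge (i+1) pat.length with hlt | hge
    · exact (occIn_succ_lt pat txt _ i hlt).symm
    · rw [occIn_succ_ge pat txt _ i hge]
      rw [if_neg, List.append_nil]
      intro h
      apply hnocc pat.length (by omega) (le_refl _)
      rw [List.take_length]
      exact (suffix_take_iff pat txt pat.length (i+1) rfl hge (by omega)).mpr h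

theorem kmp_match (pat txt : List Char) (i j : Nat) (acc : List Nat)
    (hInv : KmpInv pat txt i j acc) (hiN : i < txt.length) (hjM : j+1 < pat.length)
    (hc : pat[j]? = txt[i]?) :
    KmpInv pat txt (i+1) (j+1) acc := by
  obtain ⟨hjM', hji, _, hsuf, hmax, hacc⟩ := hInv
  have hsuf' : pat.take (j+1) <:+ txt.take (i+1) :=
    (take_succ_suffix pat txt j i (by omega) hiN).mpr ⟨hsuf, hc⟩
  have hno : ∀ k, j+1 < k → k ≤ pat.length → ¬ pat.take k <:+ txt.take (i+1) := by
    intro k hk1 hkM hks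
    obtain ⟨k', rfl⟩ : ∃ k', k = k'+1 := ⟨k-1, by omega⟩
    have hd := (take_succ_suffix pat txt k' i (by omega) hiN).mp hks
    rcases Nat.lt_or_ge k' pat.length with hklt | hklt
    · exact hmax k' (by omega) hklt hd.1 hd.2
    · omega
  refine ⟨hjM, by omega, by omega, hsuf', ?_, ?_⟩
  · intro k hk1 hk2 hks
    exact absurd hks (hno k hk1 (by omega))
  · rw [hacc]
    rcases Nat.lt_or_ge (i+1) pat.length with hlt | hge
    · exact (occIn_succ_lt pat txt _ i hlt).symm
    · rw [occIn_succ_ge pat txt _ i hge]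
      rw [if_neg, List.append_nil]
      intro h
      apply hno pat.length (by omega) (le_refl _)
      rw [List.take_length]
      exact (suffix_take_iff pat txt pat.length (i+1) rfl hge (by omega)).mpr h

theorem kmp_record (pat txt : List Char) (i j : Nat) (acc : List Nat)
    (hInv : KmpInv pat txt i j acc) (hiN : i < txt.length) (hjM : j+1 = pat.length)
    (hc : pat[j]? = txt[i]?) :
    KmpInv pat txt (i+1) (Brd pat pat.length) (acc ++ [i+1-pat.length]) := by
  obtain ⟨hjM', hji, _, hsuf, hmax, hacc⟩ := hInv
  have hfull : pat <:+ txt.take (i+1) := by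
    have := (take_succ_suffix pat txt j i (by omega) hiN).mpr ⟨hsuf, hc⟩
    rwa [hjM, List.take_length] at this
  have hble : Brd pat pat.length ≤ pat.length - 1 := Brd_le pat pat.length
  have hge : pat.length ≤ i + 1 := by omega
  refine ⟨by omega, by omega, by omega, ?_, ?_, ?_⟩
  · have := Brd_suffix pat pat.length
    rw [List.take_length] at this
    exact this.trans hfull
  · intro k hk1 hk2 hks
    exfalso
    have h1 : pat.take k <:+ pat := List.suffix_of_suffix_length_le hks hfull (by simp)
    have h1' : pat.take k <:+ pat.take pat.length := by rwa [List.take_length]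
    have := le_Brd pat pat.length k hk2 h1'
    omega
  · rw [hacc, occIn_succ_ge pat txt _ i hge, if_pos]
    exact (suffix_take_iff pat txt pat.length (i+1) rfl hge (by omega)).mp hfull

theorem kmpLoop_correct (pat txt : List Char) (lps : List Nat)
    (hlps : ∀ q, q < pat.length → lps.getD q 0 = Brd pat (q+1)) :
    ∀ fuel i j acc, KmpInv pat txt i j acc → 2*(txt.length - i) + j < fuel →
      kmpLoopA pat txt pat.length txt.length lps fuel i j acc =
        occIn pat txt pat.length txt.length := by
  intro fuel
  induction fuel with
  | zero => intro i j acc _ hf; omega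
  | succ fuel ih =>
    intro i j acc hinv hfuel
    have hinv' := hinv
    obtain ⟨hjM, hji, hiN, hsuf, hmax, hacc⟩ := hinv'
    unfold kmpLoopA
    by_cases hiNlt : i < txt.length
    · rw [if_pos hiNlt]
      have egj : pat.getD j ' ' = pat[j] := List.getD_eq_getElem pat ' ' hjM
      have egi : txt.getD i ' ' = txt[i] := List.getD_eq_getElem txt ' ' hiNlt
      have eqj : pat[j]? = some pat[j] := List.getElem?_eq_getElem hjM
      have eqi : txt[i]? = some txt[i] := List.getElem?_eq_getElem hiNlt
      by_cases hcmp : pat[j]? = txt[i]?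
      · have hbeq : (pat.getD j ' ' == txt.getD i ' ') = true := by
          rw [egj, egi, beq_iff_eq]; rw [eqj, eqi] at hcmp; exact Option.some_inj.mp hcmp
        rw [if_pos hbeq]
        dsimp only
        by_cases hjM1 : j+1 = pat.length
        · rw [if_pos (by simpa using hjM1)]
          have hrec := kmp_record pat txt i j acc hinv hiNlt hjM1 hcmp
          have hlget : lps.getD (j+1-1) 0 = Brd pat pat.length := by
            have h0 := hlps j (by omega)
            rw [Nat.add_sub_cancel, ← hjM1]
            exact h0
          rw [hlget, show i + 1 - (j + 1) = i + 1 - pat.length from by omega]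
          apply ih (i+1) (Brd pat pat.length) _ hrec
          have := Brd_le pat pat.length
          omega
        · rw [if_neg (by simpa using hjM1)]
          have hmid := kmp_match pat txt i j acc hinv hiNlt (by omega) hcmp
          by_cases hi1 : i+1 < txt.length
          · have egj' : pat.getD (j+1) ' ' = pat[j+1] := List.getD_eq_getElem pat ' ' (by omega)
            have egi' : txt.getD (i+1) ' ' = txt[i+1] := List.getD_eq_getElem txt ' ' hi1
            have e1 : pat[j+1]? = some pat[j+1] := List.getElem?_eq_getElem (by omega)
            have e2 : txt[i+1]? = some txt[i+1] := List.getElem?_eq_getElem hi1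
            by_cases hcmp' : pat[j+1]? = txt[i+1]?
            · rw [if_neg (by
                simp only [egj', egi', beq_iff_eq]
                rw [e1, e2] at hcmp'
                simp [Option.some_inj.mp hcmp'])]
              apply ih (i+1) (j+1) acc hmid
              omega
            · rw [if_pos (by
                have hne : pat[j+1] ≠ txt[i+1] := by
                  intro h; exact hcmp' (by rw [e1, e2, h])
                rw [egj', egi']
                simp [hi1, hne])]
              rw [if_pos (by simp)]
              have hsh := kmp_shift pat txt (i+1) (j+1) acc hmid (by omega) hcmp'
              have hlget : lps.getD (j+1-1) 0 = Brd pat (j+1) := by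
                have := hlps j (by omega); simpa using this
              rw [hlget]
              apply ih (i+1) (Brd pat (j+1)) acc hsh
              have := Brd_le pat (j+1)
              omega
          · rw [if_neg (by simp [hi1])]
            apply ih (i+1) (j+1) acc hmid
            omega
      · have hbeq : (pat.getD j ' ' == txt.getD i ' ') = false := by
          rw [egj, egi, beq_eq_false_iff_ne, ne_eq]
          intro h; exact hcmp (by rw [eqj, eqi, h])
        have hp : (if (pat.getD j ' ' == txt.getD i ' ') = true then (i+1, j+1) else (i, j))
            = (i, j) := if_neg (by rw [hbeq]; simp)
        rw [hp]
        dsimp only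
        rw [if_neg (by simp; omega)]
        rw [if_pos (by rw [hbeq]; simp [hiNlt])]
        by_cases hj0 : j = 0
        · subst hj0
          rw [if_neg (by simp)]
          apply ih (i+1) 0 acc (kmp_advance pat txt i acc hinv hiNlt hcmp)
          omega
        · rw [if_pos (by simpa using hj0)]
          have hsh := kmp_shift pat txt i j acc hinv (by omega) hcmp
          have hlget : lps.getD (j-1) 0 = Brd pat j := by
            have := hlps (j-1) (by omega)
            rwa [Nat.sub_add_cancel (by omega)] at this
          rw [hlget]
          apply ih i (Brd pat j) acc hsh
          have := Brd_le pat j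
          omega
    · rw [if_neg hiNlt]
      rw [hacc, show i = txt.length from by omega]

theorem computeLPSArrayA_correct (pat : List Char) (h1 : 1 ≤ pat.length) :
    ∀ q, q < pat.length →
      (computeLPSArrayA pat pat.length (List.replicate pat.length 0)).getD q 0 = Brd pat (q+1) := by
  unfold computeLPSArrayA
  apply lpsLoop_correct pat (2*pat.length+1) 0 1 (List.replicate pat.length 0) ?_ (by omega)
  refine ⟨le_refl _, h1, by simp, ?_, by omega, by simp, by omega⟩
  intro q hq
  have hq0 : q = 0 := by omega
  subst hq0
  rw [List.getD_replicate _ (by omega)]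
  unfold Brd
  rw [Nat.findGreatest_zero]

theorem KMPSearchA_correct (pat txt : List Char) (h1 : 1 ≤ pat.length) :
    KMPSearchA pat txt = occIn pat txt pat.length txt.length := by
  unfold KMPSearchA
  apply kmpLoop_correct pat txt _ (computeLPSArrayA_correct pat h1) (2*txt.length+1) 0 0 [] ?_ (by omega)
  refine ⟨by omega, le_refl _, by omega, by simp, ?_, ?_⟩
  · intro k hk1 hk2 hks
    exfalso
    rw [List.take_zero, List.suffix_nil] at hks
    have : (pat.take k).length = k := by simp; omega
    rw [hks] at this
    simp at this
    omega
  · unfold occIn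
    rw [show 0+1-pat.length = 0 from by omega]
    rfl

theorem range_filter_occ (pat txt : List Char) (h1 : 1 ≤ pat.length) :
    (List.range txt.length).filter (fun p => decide ((txt.drop p).take pat.length = pat))
      = occIn pat txt pat.length txt.length := by
  have hfalse : ∀ p, txt.length < p + pat.length → ¬((txt.drop p).take pat.length = pat) := by
    intro p hp h
    have := congrArg List.length h
    simp [List.length_take, List.length_drop] at this
    omega
  by_cases hMN : pat.length ≤ txt.length
  · have hsplit : List.range txt.length =
        List.range (txt.length+1-pat.length) ++
          (List.range (pat.length-1)).map ((txt.length+1-pat.length) + ·) := by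
      rw [← List.range_add]
      congr 1
      omega
    rw [hsplit, List.filter_append]
    have h2 : ((List.range (pat.length-1)).map ((txt.length+1-pat.length) + ·)).filter
        (fun p => decide ((txt.drop p).take pat.length = pat)) = [] := by
      rw [List.filter_eq_nil_iff]
      intro a ha
      simp only [List.mem_map, List.mem_range] at ha
      obtain ⟨x, hx, rfl⟩ := ha
      simpa using hfalse _ (by omega)
    rw [h2, List.append_nil]
    rfl
  · have h2 : occIn pat txt pat.length txt.length = [] := by
      unfold occIn
      rw [show txt.length+1-pat.length = 0 from by omega]
      rfl
    rw [h2, List.filter_eq_nil_iff]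
    intro a ha
    simp only [List.mem_range] at ha
    simpa using hfalse a (by omega)

theorem foldA_canon (pat txt : List Char) (l : List Nat) (init : List String) :
    l.foldl (fun acc (index : Nat) =>
      if ((index : Nat) : Int) + (pat.length : Int) ≤ (txt.length : Int) - 1 then
        acc ++ [String.ofList [PySem.List.pyGetD txt
          (((index : Nat) : Int) + (pat.length : Int)) ' ']]
      else acc) init
    = init ++ ((l.filter (fun p => decide (p + pat.length + 1 ≤ txt.length))).map
        (fun p => String.ofList [txt.getD (p + pat.length) ' '])) := by
  have hfun : (fun (acc : List String) (index : Nat) =>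
      if ((index : Nat) : Int) + (pat.length : Int) ≤ (txt.length : Int) - 1 then
        acc ++ [String.ofList [PySem.List.pyGetD txt
          (((index : Nat) : Int) + (pat.length : Int)) ' ']]
      else acc)
      = (fun (acc : List String) (index : Nat) =>
        if (fun p => decide (p + pat.length + 1 ≤ txt.length)) index then
          acc ++ [(fun p => String.ofList [txt.getD (p + pat.length) ' ']) index]
        else acc) := by
    funext acc index
    by_cases h : index + pat.length + 1 ≤ txt.length
    · rw [if_pos (show ((index : Nat) : Int) + (pat.length : Int) ≤ (txt.length : Int) - 1 by
        push_cast; omega)]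
      rw [if_pos (by simpa using h)]
      rw [show ((index : Nat) : Int) + (pat.length : Int) = ((index + pat.length : Nat) : Int)
        by push_cast; ring]
      rw [PySem.List.pyGetD_natCast]
    · rw [if_neg (show ¬(((index : Nat) : Int) + (pat.length : Int) ≤ (txt.length : Int) - 1) by
        push_cast; omega)]
      rw [if_neg (by simpa using h)]
  rw [hfun, PySem.List.foldl_append_if]

theorem foldB_canon (pat txt : List Char) (init : List String) :
    (PySem.List.pyRange 0 (txt.length : Int) 1).foldl (fun acc (i : Int) =>
      if PySem.List.slice txt (some i) (some (i + (pat.length : Int))) = pat ∧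
          i + (pat.length : Int) ≤ (txt.length : Int) - 1 then
        acc ++ [String.ofList [PySem.List.pyGetD txt (i + (pat.length : Int)) ' ']]
      else acc) init
    = init ++ (((List.range txt.length).filter (fun p =>
          decide ((txt.drop p).take pat.length = pat) && decide (p + pat.length + 1 ≤ txt.length))).map
        (fun p => String.ofList [txt.getD (p + pat.length) ' '])) := by
  rw [PySem.List.pyRange_zero_nat txt.length, List.foldl_map]
  have hfun : (fun (acc : List String) (k : Nat) =>
      if PySem.List.slice txt (some (k : Int)) (some ((k : Int) + (pat.length : Int))) = pat ∧
          (k : Int) + (pat.length : Int) ≤ (txt.length : Int) - 1 then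
        acc ++ [String.ofList [PySem.List.pyGetD txt ((k : Int) + (pat.length : Int)) ' ']]
      else acc)
      = (fun (acc : List String) (k : Nat) =>
        if (fun p => decide ((txt.drop p).take pat.length = pat) &&
              decide (p + pat.length + 1 ≤ txt.length)) k then
          acc ++ [(fun p => String.ofList [txt.getD (p + pat.length) ' ']) k]
        else acc) := by
    funext acc k
    have hslice : PySem.List.slice txt (some (k : Int)) (some ((k : Int) + (pat.length : Int)))
        = (txt.drop k).take pat.length := PySem.List.slice_natCast_add txt k pat.length
    by_cases hm : (txt.drop k).take pat.length = pat
    · by_cases hb : k + pat.length + 1 ≤ txt.length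
      · rw [if_pos ⟨by rw [hslice]; exact hm, by push_cast; omega⟩]
        rw [if_pos (by simp [hm, hb])]
        rw [show (k : Int) + (pat.length : Int) = ((k + pat.length : Nat) : Int) by push_cast; ring]
        rw [PySem.List.pyGetD_natCast]
      · rw [if_neg (by
          rintro ⟨-, hc⟩
          have : k + pat.length + 1 ≤ txt.length := by
            have := hc
            push_cast at this
            omega
          exact hb this)]
        rw [if_neg (by simp [hb])]
    · rw [if_neg (by rintro ⟨hc, -⟩; rw [hslice] at hc; exact hm hc)]
      rw [if_neg (by simp [hm])]
  rw [hfun, PySem.List.foldl_append_if]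

theorem filters_eq (pat txt : List Char) (h1 : 1 ≤ pat.length) :
    (List.range txt.length).filter (fun p =>
        decide ((txt.drop p).take pat.length = pat) && decide (p + pat.length + 1 ≤ txt.length))
      = (occIn pat txt pat.length txt.length).filter
          (fun p => decide (p + pat.length + 1 ≤ txt.length)) := by
  rw [← range_filter_occ pat txt h1, List.filter_filter]
  apply List.filter_congr
  intro a ha
  rw [Bool.and_comm]

theorem joinAll (l : List (List Char)) : PySem.Chars.join [] l = l.flatten := by
  induction l with
  | nil => rw [PySem.Chars.join_nil]; rfl
  | cons a t ih =>
    cases t with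
    | nil => rw [PySem.Chars.join_singleton]; simp
    | cons b r =>
      rw [PySem.Chars.join_cons_cons]
      simp only [List.flatten_cons] at ih ⊢
      rw [ih]
      simp

theorem main_eq (opp : List String) (hpre : Pre_countNextMoves opp) :
    countNextMoves opp = countNextMoves_alt opp := by
  obtain ⟨hlen, hpat⟩ := hpre
  have e3 : PySem.List.pyGet? opp (-3) = some opp[opp.length-3] := by
    rw [PySem.List.pyGet?_neg_ofNat opp 3 (by omega) (by omega)]
    exact List.getElem?_eq_getElem (by omega)
  have e2 : PySem.List.pyGet? opp (-2) = some opp[opp.length-2] := by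
    rw [PySem.List.pyGet?_neg_ofNat opp 2 (by omega) (by omega)]
    exact List.getElem?_eq_getElem (by omega)
  have e1 : PySem.List.pyGet? opp (-1) = some opp[opp.length-1] := by
    rw [PySem.List.pyGet?_neg_ofNat opp 1 (by omega) (by omega)]
    exact List.getElem?_eq_getElem (by omega)
  have hd3 : opp.drop (opp.length - 3) =
      [opp[opp.length-3], opp[opp.length-2], opp[opp.length-1]] := by
    rw [List.drop_eq_getElem_cons (by omega : opp.length - 3 < opp.length)]
    rw [show opp.length - 3 + 1 = opp.length - 2 from by omega]
    rw [List.drop_eq_getElem_cons (by omega : opp.length - 2 < opp.length)]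
    rw [show opp.length - 2 + 1 = opp.length - 1 from by omega]
    rw [List.drop_eq_getElem_cons (by omega : opp.length - 1 < opp.length)]
    rw [show opp.length - 1 + 1 = opp.length from by omega]
    rw [List.drop_length]
  have hpne : opp[opp.length-3].toList ++ opp[opp.length-2].toList ++ opp[opp.length-1].toList
      ≠ [] := by
    intro h
    apply hpat
    rw [hd3]
    simpa using h
  have hpat1 : 1 ≤ (opp[opp.length-3].toList ++ opp[opp.length-2].toList
      ++ opp[opp.length-1].toList).length := by
    rcases Nat.eq_zero_or_pos (opp[opp.length-3].toList ++ opp[opp.length-2].toList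
      ++ opp[opp.length-1].toList).length with h | h
    · exact absurd (List.eq_nil_of_length_eq_zero h) hpne
    · omega
  have htxt : opp.foldl (fun acc x => acc ++ x.toList) [] =
      PySem.Chars.join [] (opp.map String.toList) := by
    rw [PySem.List.foldl_append_eq_flatMap String.toList opp [], joinAll, List.nil_append]
    rw [List.flatMap_def]
  unfold countNextMoves countNextMoves_alt
  rw [e3, e2, e1]
  dsimp only
  rw [htxt]
  rw [KMPSearchA_correct _ _ hpat1]
  rw [foldA_canon, foldB_canon, filters_eq _ _ hpat1]

-- ===== VERDICT (by name: the statement is the Claim_ definition above) =====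
theorem countNextMoves_spec : Claim_equal_countNextMoves := by
  intro opponent_history hdom hpre
  unfold Spec_countNextMoves
  exact main_eq opponent_history hpre
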